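-- pv_equiv track=rewrite | github.com/fkvivid/ai-assissted-apply | backend/app/pdf_compile.py | _first_latex_error_block
-- ===== SOURCE A (Python) =====
-- def _first_latex_error_block(raw_log: str, context_lines: int = 48) -> str | None:
--     """Prefer real errors over the trailing 'Fatal error occurred' summary line."""
--     lines = raw_log.splitlines()
--     n = len(lines)
--
--     def chunk(start: int) -> str:
--         return "\n".join(lines[start : min(start + context_lines, n)])
--
--     for i, line in enumerate(lines):
--         if line.strip().startswith("!"):
--             return chunk(i)
--     for i, line in enumerate(lines):
--         if "LaTeX Error" in line or "Emergency stop" in line: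
--             return chunk(i)
--     for i, line in enumerate(lines):
--         if "Package " in line and " Error" in line:
--             return chunk(i)
--     for i, line in enumerate(lines):
--         if line.strip().startswith("*** "):
--             return chunk(i)
--     for i, line in enumerate(lines):
--         if "Fatal error" in line and "output PDF" in line:
--             return chunk(i)
--     return None
-- ===== SOURCE B (Python) =====
-- def _first_latex_error_block(raw_log: str, context_lines: int = 48) -> str | None:
--     """One pass: record the first line index per priority class, then pick by priority."""
--     lines = raw_log.splitlines()
--     n = len(lines)
--     preds = [
--         lambda l: l.strip().startswith("!"),
--         lambda l: "LaTeX Error" in l or "Emergency stop" in l,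
--         lambda l: "Package " in l and " Error" in l,
--         lambda l: l.strip().startswith("*** "),
--         lambda l: "Fatal error" in l and "output PDF" in l,
--     ]
--     slots = [None] * 5
--     for i, line in enumerate(lines):
--         for k, p in enumerate(preds):
--             if slots[k] is None and p(line):
--                 slots[k] = i
--     for s in slots:
--         if s is not None:
--             return "\n".join(lines[s : min(s + context_lines, n)])
--     return None
-- ===== Notes on version B (the rewrite author's own statement) =====
-- stated objective: alternative
-- what changed: Replaces A's five sequential full scans of the lines by a single pass that records the first matching line index per priority class, followed by a priority-order selection over the five recorded slots.
import Mathlib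
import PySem

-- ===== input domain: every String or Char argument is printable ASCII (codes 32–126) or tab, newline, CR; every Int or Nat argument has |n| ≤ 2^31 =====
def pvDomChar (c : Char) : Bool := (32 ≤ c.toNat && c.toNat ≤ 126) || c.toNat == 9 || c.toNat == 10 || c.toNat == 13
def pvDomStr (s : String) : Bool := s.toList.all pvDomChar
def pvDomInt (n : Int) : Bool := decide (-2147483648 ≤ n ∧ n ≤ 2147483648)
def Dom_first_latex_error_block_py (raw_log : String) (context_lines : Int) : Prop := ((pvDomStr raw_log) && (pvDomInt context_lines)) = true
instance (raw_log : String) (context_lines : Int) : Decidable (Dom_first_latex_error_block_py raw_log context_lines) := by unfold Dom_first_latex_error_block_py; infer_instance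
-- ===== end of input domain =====

-- B is an alternative of the same cost: one pass recording first-match indices per class, then priority selection,
-- instead of A's five sequential scans.

-- the five line predicates, shared verbatim by both Pythons
def pvP1 (line : String) : Bool := PySem.Str.startswith (PySem.Str.strip line) "!"
def pvP2 (line : String) : Bool := PySem.Str.isIn "LaTeX Error" line || PySem.Str.isIn "Emergency stop" line
def pvP3 (line : String) : Bool := PySem.Str.isIn "Package " line && PySem.Str.isIn " Error" line
def pvP4 (line : String) : Bool := PySem.Str.startswith (PySem.Str.strip line) "*** "
def pvP5 (line : String) : Bool := PySem.Str.isIn "Fatal error" line && PySem.Str.isIn "output PDF" line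

-- chunk(start) = "\n".join(lines[start : min(start + context_lines, n)]) — identical helper in both Pythons
def pvChunk (lines : List String) (context_lines : Int) (start : Int) : String :=
  PySem.Str.join "\n" (PySem.List.slice lines (some start) (some (min (start + context_lines) (lines.length : Int))))

-- ===== PORT A =====
-- 'for i, line in enumerate(lines): if p(line): return …' — one such scan per loop
def pvScan (p : String → Bool) : List (Int × String) → Option Int
  | [] => none
  | (i, line) :: rest => if p line then some i else pvScan p rest

def first_latex_error_block_py (raw_log : String) (context_lines : Int) : Option String :=
  let lines := PySem.Str.splitlines raw_log
  let items := PySem.List.enumerate lines 0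
  match pvScan pvP1 items with
  | some i => some (pvChunk lines context_lines i)
  | none =>
    match pvScan pvP2 items with
    | some i => some (pvChunk lines context_lines i)
    | none =>
      match pvScan pvP3 items with
      | some i => some (pvChunk lines context_lines i)
      | none =>
        match pvScan pvP4 items with
        | some i => some (pvChunk lines context_lines i)
        | none =>
          match pvScan pvP5 items with
          | some i => some (pvChunk lines context_lines i)
          | none => none

-- ===== PORT B =====
-- the inner 'for k, p in enumerate(preds)' pass updating the five slots for one line
def pvStep (s : Option Int × Option Int × Option Int × Option Int × Option Int)
    (it : Int × String) : Option Int × Option Int × Option Int × Option Int × Option Int :=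
  match s, it with
  | (s1, s2, s3, s4, s5), (i, line) =>
    (if s1.isNone && pvP1 line then some i else s1,
     if s2.isNone && pvP2 line then some i else s2,
     if s3.isNone && pvP3 line then some i else s3,
     if s4.isNone && pvP4 line then some i else s4,
     if s5.isNone && pvP5 line then some i else s5)

def first_latex_error_block_py_alt (raw_log : String) (context_lines : Int) : Option String :=
  let lines := PySem.Str.splitlines raw_log
  let slots := (PySem.List.enumerate lines 0).foldl pvStep (none, none, none, none, none)
  -- 'for s in slots: if s is not None: return chunk(s)'
  match slots with
  | (some i, _, _, _, _) => some (pvChunk lines context_lines i)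
  | (none, some i, _, _, _) => some (pvChunk lines context_lines i)
  | (none, none, some i, _, _) => some (pvChunk lines context_lines i)
  | (none, none, none, some i, _) => some (pvChunk lines context_lines i)
  | (none, none, none, none, some i) => some (pvChunk lines context_lines i)
  | (none, none, none, none, none) => none

-- ===== PRECONDITION & SPEC =====
def Spec_first_latex_error_block_py (raw_log : String) (context_lines : Int) (out : Option String) : Prop := out = first_latex_error_block_py_alt raw_log context_lines
instance (raw_log : String) (context_lines : Int) (out : Option String) : Decidable (Spec_first_latex_error_block_py raw_log context_lines out) := by unfold Spec_first_latex_error_block_py; infer_instance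

-- ===== CLAIM (what is proved, stated in full; the proofs are below) =====
def Claim_equal_first_latex_error_block_py : Prop := ∀ (raw_log : String) (context_lines : Int), Dom_first_latex_error_block_py raw_log context_lines → Spec_first_latex_error_block_py raw_log context_lines (first_latex_error_block_py raw_log context_lines)

-- ===== LEMMAS AND PROOFS =====

-- a slot set at most once commutes with continuing the scan
theorem pvSlot_orElse (s : Option Int) (b : Bool) (i : Int) (r : Option Int) :
    (if s.isNone && b then some i else s).orElse (fun _ => r) =
      s.orElse (fun _ => if b then some i else r) := by
  cases s <;> cases b <;> rfl

-- the fold's slots are exactly the five first-match scans (each slot, once set, stays set)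
theorem pvFold_eq_scan (items : List (Int × String))
    (s1 s2 s3 s4 s5 : Option Int) :
    items.foldl pvStep (s1, s2, s3, s4, s5) =
      (s1.orElse (fun _ => pvScan pvP1 items),
       s2.orElse (fun _ => pvScan pvP2 items),
       s3.orElse (fun _ => pvScan pvP3 items),
       s4.orElse (fun _ => pvScan pvP4 items),
       s5.orElse (fun _ => pvScan pvP5 items)) := by
  induction items generalizing s1 s2 s3 s4 s5 with
  | nil => cases s1 <;> cases s2 <;> cases s3 <;> cases s4 <;> cases s5 <;> rfl
  | cons hd tl ih =>
    obtain ⟨i, line⟩ := hd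
    simp only [List.foldl_cons, pvStep, pvScan, ih]
    refine congrArg₂ Prod.mk (pvSlot_orElse ..) (congrArg₂ Prod.mk (pvSlot_orElse ..)
      (congrArg₂ Prod.mk (pvSlot_orElse ..) (congrArg₂ Prod.mk (pvSlot_orElse ..) (pvSlot_orElse ..))))

-- ===== VERDICT (by name: the statement is the Claim_ definition above) =====
theorem first_latex_error_block_py_spec : Claim_equal_first_latex_error_block_py := by
  intro raw_log context_lines _
  unfold Spec_first_latex_error_block_py first_latex_error_block_py first_latex_error_block_py_alt
  simp only [pvFold_eq_scan]
  cases pvScan pvP1 (PySem.List.enumerate (PySem.Str.splitlines raw_log) 0) <;>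
  cases pvScan pvP2 (PySem.List.enumerate (PySem.Str.splitlines raw_log) 0) <;>
  cases pvScan pvP3 (PySem.List.enumerate (PySem.Str.splitlines raw_log) 0) <;>
  cases pvScan pvP4 (PySem.List.enumerate (PySem.Str.splitlines raw_log) 0) <;>
  cases pvScan pvP5 (PySem.List.enumerate (PySem.Str.splitlines raw_log) 0) <;>
  simp [Option.orElse]
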